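-- pv_equiv track=rewrite | github.com/emilywei4/bioinformatics-portfolio | Multiple Sequence Alignment & Phylogenetics/advanced_alignment_dp/multiple_alignment.py | multiple_alignment
-- ===== SOURCE A (Python) =====
-- from typing import List, Dict, Iterable, Tuple
--
-- def multiple_alignment(s1: str, s2: str, s3: str) -> Tuple[int, str, str, str]:
--     """
--     Compute a multiple alignment solving the Multiple Longest Common Subsequence Problem for three input strings.
--     """
--     lenS1 = len(s1)
--     lenS2 = len(s2)
--     lenS3 = len(s3)
--
--     # initialize alignment graph (same as before, but add a third element)
--     alignmentGraph = [[[0] * (lenS3 + 1) for _ in range(lenS2 + 1)] for _ in range(lenS1 + 1)]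
--
--     for i in range(1, lenS1 + 1):
--         for j in range(1, lenS2 + 1):
--             for k in range(1, lenS3 + 1):
--                 if s1[i-1] == s2[j-1] == s3[k-1]:
--                     alignmentGraph[i][j][k] = alignmentGraph[i-1][j-1][k-1] + 1
--                 else:
--                     alignmentGraph[i][j][k] = max(alignmentGraph[i-1][j][k], alignmentGraph[i][j-1][k], alignmentGraph[i][j][k-1])
--
--     #start at the bottom right corner of the cube (lenS1, lenS2, lenS3)
--     i = lenS1
--     j = lenS2
--     k = lenS3
--
--     #initialize alignment strings
--     alignS1 = ""
--     alignS2 = ""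
--     alignS3 = ""
--
--     #backtrack from the bottom right corner until all nodes have been visited (top left corner at (0,0,0))
--     while i > 0 or j > 0 or k > 0:
--         #if the current characters are all equal, they get added to their alignment string and we move toward (0,0,0) in all directions
--         if i > 0 and j > 0 and k > 0 and s1[i-1] == s2[j-1] == s3[k-1]:
--             alignS1 = s1[i-1] + alignS1
--             alignS2 = s2[j-1] + alignS2
--             alignS3 = s3[k-1] + alignS3
--             i-=1
--             j-=1
--             k-=1
--         #if our current i is equal to our previous i, then we move in the ith direction, keeping j and k the same (adding dashes in alignment string)
--         elif i > 0 and alignmentGraph[i][j][k] == alignmentGraph[i - 1][j][k]: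
--             alignS1 = s1[i-1] + alignS1
--             alignS2 = "-" + alignS2
--             alignS3 = "-" + alignS3
--             i-=1 #only moved in i direction
--         #if our current j is equal to our previous j, then we move in the jth direction, keeping i and k the same (adding dashes in alignment string)
--         elif j > 0 and alignmentGraph[i][j][k] == alignmentGraph[i][j-1][k]:
--             alignS1 = "-" + alignS1
--             alignS2 = s2[j-1] + alignS2
--             alignS3 = "-" + alignS3
--             j-=1 #only moved in j direction
--         #if our current k is equal to our previous k, then we move in the kth direction, keeping i and j the same (adding dashes in alignment string)
--         elif k > 0 and alignmentGraph[i][j][k] == alignmentGraph[i][j][k-1]: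
--             alignS1 = "-" + alignS1
--             alignS2 = "-" + alignS2
--             alignS3 = s3[k-1] + alignS3
--             k-=1 #only moved in k direction
--
--     return alignmentGraph[lenS1][lenS2][lenS3], alignS1, alignS2, alignS3
-- ===== SOURCE B (Python) =====
-- def multiple_alignment(s1, s2, s3):
--     """
--     Same MLCS alignment as A, but the DP table is computed lazily by a
--     memoized top-down recursion (dict keyed by (i,j,k)) instead of a
--     bottom-up triple loop, and the traceback collects column tuples in a
--     list (joined at the end) instead of prepending to three strings.
--     """
--     memo = {}
--
--     def f(i, j, k):
--         if i == 0 or j == 0 or k == 0: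
--             return 0
--         v = memo.get((i, j, k))
--         if v is None:
--             if s1[i-1] == s2[j-1] == s3[k-1]:
--                 v = f(i-1, j-1, k-1) + 1
--             else:
--                 v = max(f(i-1, j, k), f(i, j-1, k), f(i, j, k-1))
--             memo[(i, j, k)] = v
--         return v
--
--     i, j, k = len(s1), len(s2), len(s3)
--     score = f(i, j, k)
--
--     parts = []
--     while i > 0 or j > 0 or k > 0:
--         if i > 0 and j > 0 and k > 0 and s1[i-1] == s2[j-1] == s3[k-1]:
--             parts.append((s1[i-1], s2[j-1], s3[k-1]))
--             i -= 1; j -= 1; k -= 1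
--         elif i > 0 and f(i, j, k) == f(i-1, j, k):
--             parts.append((s1[i-1], "-", "-"))
--             i -= 1
--         elif j > 0 and f(i, j, k) == f(i, j-1, k):
--             parts.append(("-", s2[j-1], "-"))
--             j -= 1
--         elif k > 0 and f(i, j, k) == f(i, j, k-1):
--             parts.append(("-", "-", s3[k-1]))
--             k -= 1
--     parts.reverse()
--     a1 = "".join(p[0] for p in parts)
--     a2 = "".join(p[1] for p in parts)
--     a3 = "".join(p[2] for p in parts)
--     return score, a1, a2, a3
-- ===== Notes on version B (the rewrite author's own statement) =====
-- stated objective: alternative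
-- what changed: The bottom-up triple-nested-loop fill of the full (l1+1)x(l2+1)x(l3+1) cube is replaced by a lazily memoized top-down recursion over a dict keyed by (i,j,k) that materializes only the cells the score and traceback actually query, and the traceback builds a list of column tuples joined at the end instead of prepending characters to three strings.
import Mathlib
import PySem

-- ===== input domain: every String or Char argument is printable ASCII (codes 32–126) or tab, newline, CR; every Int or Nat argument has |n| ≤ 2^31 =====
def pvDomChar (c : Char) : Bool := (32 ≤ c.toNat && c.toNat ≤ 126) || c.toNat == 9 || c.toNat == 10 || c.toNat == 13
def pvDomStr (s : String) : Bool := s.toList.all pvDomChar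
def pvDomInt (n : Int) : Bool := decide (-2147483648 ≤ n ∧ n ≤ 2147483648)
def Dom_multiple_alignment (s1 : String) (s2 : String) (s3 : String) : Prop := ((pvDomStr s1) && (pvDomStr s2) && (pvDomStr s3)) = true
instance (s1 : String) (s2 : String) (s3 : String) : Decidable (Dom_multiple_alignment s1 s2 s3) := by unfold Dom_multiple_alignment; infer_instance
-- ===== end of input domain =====

-- B replaces A's bottom-up triple-loop fill of the whole DP cube by a memoized top-down
-- recursion (dict keyed by (i,j,k)) computing only queried cells, and assembles the
-- traceback as a list of column tuples joined at the end (alternative decomposition).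

-- ===== PORT A =====
-- s[n] for an index the Python code only uses in range (1 ≤ i ≤ len): exact there.
def pvChAt (cs : List Char) (n : Nat) : Char := cs.getD n ' '

-- alignmentGraph[a][b][c] (indices always in bounds in A's code)
def pvGet3 (t : List (List (List Int))) (a b c : Nat) : Int :=
  ((t.getD a []).getD b []).getD c 0

-- alignmentGraph[i][j][k] = v
def pvSet3 (t : List (List (List Int))) (i j k : Nat) (v : Int) : List (List (List Int)) :=
  t.set i ((t.getD i []).set j (((t.getD i []).getD j []).set k v))

-- the right-hand side assigned to alignmentGraph[i][j][k] in A's inner loop body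
def pvCellA (cs1 cs2 cs3 : List Char) (t : List (List (List Int))) (i j k : Nat) : Int :=
  if pvChAt cs1 (i-1) = pvChAt cs2 (j-1) ∧ pvChAt cs2 (j-1) = pvChAt cs3 (k-1) then
    pvGet3 t (i-1) (j-1) (k-1) + 1
  else
    max (max (pvGet3 t (i-1) j k) (pvGet3 t i (j-1) k)) (pvGet3 t i j (k-1))

-- A's zero-initialised cube and its triple `for i/j/k in range(1, len+1)` fill,
-- as nested folds over the same index sequences ((List.range n).map (·+1) = [1,…,n]).
def pvFillA (cs1 cs2 cs3 : List Char) : List (List (List Int)) :=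
  ((List.range cs1.length).map (· + 1)).foldl (fun t i =>
    ((List.range cs2.length).map (· + 1)).foldl (fun t j =>
      ((List.range cs3.length).map (· + 1)).foldl (fun t k =>
        pvSet3 t i j k (pvCellA cs1 cs2 cs3 t i j k)) t) t)
    (List.replicate (cs1.length + 1) (List.replicate (cs2.length + 1) (List.replicate (cs3.length + 1) (0 : Int))))

-- A's backtracking while-loop; fuel = i+j+k bounds the iterations (each firing branch
-- decreases i+j+k by ≥ 1; the loop ends when i=j=k=0), state (i,j,k, three strings).
def pvTbA (G : List (List (List Int))) (cs1 cs2 cs3 : List Char) :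
    Nat → Nat → Nat → Nat → List Char → List Char → List Char → List Char × List Char × List Char
  | 0, _, _, _, a1, a2, a3 => (a1, a2, a3)
  | fuel+1, i, j, k, a1, a2, a3 =>
    if 0 < i ∨ 0 < j ∨ 0 < k then
      if 0 < i ∧ 0 < j ∧ 0 < k ∧ pvChAt cs1 (i-1) = pvChAt cs2 (j-1) ∧ pvChAt cs2 (j-1) = pvChAt cs3 (k-1) then
        pvTbA G cs1 cs2 cs3 fuel (i-1) (j-1) (k-1) (pvChAt cs1 (i-1) :: a1) (pvChAt cs2 (j-1) :: a2) (pvChAt cs3 (k-1) :: a3)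
      else if 0 < i ∧ pvGet3 G i j k = pvGet3 G (i-1) j k then
        pvTbA G cs1 cs2 cs3 fuel (i-1) j k (pvChAt cs1 (i-1) :: a1) ('-' :: a2) ('-' :: a3)
      else if 0 < j ∧ pvGet3 G i j k = pvGet3 G i (j-1) k then
        pvTbA G cs1 cs2 cs3 fuel i (j-1) k ('-' :: a1) (pvChAt cs2 (j-1) :: a2) ('-' :: a3)
      else if 0 < k ∧ pvGet3 G i j k = pvGet3 G i j (k-1) then
        pvTbA G cs1 cs2 cs3 fuel i j (k-1) ('-' :: a1) ('-' :: a2) (pvChAt cs3 (k-1) :: a3)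
      else
        pvTbA G cs1 cs2 cs3 fuel i j k a1 a2 a3
    else (a1, a2, a3)

def multiple_alignment (s1 : String) (s2 : String) (s3 : String) : Int × String × String × String :=
  let cs1 := s1.toList
  let cs2 := s2.toList
  let cs3 := s3.toList
  let G := pvFillA cs1 cs2 cs3
  let r := pvTbA G cs1 cs2 cs3 (cs1.length + cs2.length + cs3.length) cs1.length cs2.length cs3.length [] [] []
  (pvGet3 G cs1.length cs2.length cs3.length, String.ofList r.1, String.ofList r.2.1, String.ofList r.2.2)

-- ===== PORT B =====
-- B's memoized recursive f(i,j,k): the dict `memo` is threaded through; fuel = i+j+k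
-- makes the recursion structural (every recursive call strictly decreases i+j+k).
def pvF (cs1 cs2 cs3 : List Char) :
    Nat → Nat → Nat → Nat → PySem.Dict (Nat × Nat × Nat) Int → Int × PySem.Dict (Nat × Nat × Nat) Int
  | 0, _, _, _, m => (0, m)   -- unreachable: pvF is always called with fuel = i+j+k
  | fuel+1, i, j, k, m =>
    if i = 0 ∨ j = 0 ∨ k = 0 then (0, m)
    else
      match m.get? (i, j, k) with
      | some v => (v, m)
      | none =>
        if pvChAt cs1 (i-1) = pvChAt cs2 (j-1) ∧ pvChAt cs2 (j-1) = pvChAt cs3 (k-1) then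
          let r := pvF cs1 cs2 cs3 fuel (i-1) (j-1) (k-1) m
          let v := r.1 + 1
          (v, r.2.insert (i, j, k) v)
        else
          let r1 := pvF cs1 cs2 cs3 fuel (i-1) j k m
          let r2 := pvF cs1 cs2 cs3 fuel i (j-1) k r1.2
          let r3 := pvF cs1 cs2 cs3 fuel i j (k-1) r2.2
          let v := max (max r1.1 r2.1) r3.1
          (v, r3.2.insert (i, j, k) v)

-- a call f(i,j,k) of B's Python (its own i+j+k as fuel)
def pvCallF (cs1 cs2 cs3 : List Char) (i j k : Nat) (m : PySem.Dict (Nat × Nat × Nat) Int) :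
    Int × PySem.Dict (Nat × Nat × Nat) Int :=
  pvF cs1 cs2 cs3 (i + j + k) i j k m

-- B's while-loop appending column tuples to `parts`; the memo dict is threaded through
-- the f-calls its branch conditions make in evaluation order (fuel as in pvTbA; the
-- memo is a cache only — repeated pvCallF applications below return the same values
-- Python's repeated f-calls return).
def pvTbB (cs1 cs2 cs3 : List Char) :
    Nat → Nat → Nat → Nat → PySem.Dict (Nat × Nat × Nat) Int → List (Char × Char × Char) → List (Char × Char × Char)
  | 0, _, _, _, _, p => p
  | fuel+1, i, j, k, m, p =>
    if 0 < i ∨ 0 < j ∨ 0 < k then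
      if 0 < i ∧ 0 < j ∧ 0 < k ∧ pvChAt cs1 (i-1) = pvChAt cs2 (j-1) ∧ pvChAt cs2 (j-1) = pvChAt cs3 (k-1) then
        pvTbB cs1 cs2 cs3 fuel (i-1) (j-1) (k-1) m (p ++ [(pvChAt cs1 (i-1), pvChAt cs2 (j-1), pvChAt cs3 (k-1))])
      else if 0 < i ∧ (pvCallF cs1 cs2 cs3 i j k m).1 =
          (pvCallF cs1 cs2 cs3 (i-1) j k (pvCallF cs1 cs2 cs3 i j k m).2).1 then
        pvTbB cs1 cs2 cs3 fuel (i-1) j k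
          (pvCallF cs1 cs2 cs3 (i-1) j k (pvCallF cs1 cs2 cs3 i j k m).2).2
          (p ++ [(pvChAt cs1 (i-1), '-', '-')])
      else if 0 < j ∧ (pvCallF cs1 cs2 cs3 i j k m).1 =
          (pvCallF cs1 cs2 cs3 i (j-1) k (pvCallF cs1 cs2 cs3 (i-1) j k (pvCallF cs1 cs2 cs3 i j k m).2).2).1 then
        pvTbB cs1 cs2 cs3 fuel i (j-1) k
          (pvCallF cs1 cs2 cs3 i (j-1) k (pvCallF cs1 cs2 cs3 (i-1) j k (pvCallF cs1 cs2 cs3 i j k m).2).2).2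
          (p ++ [('-', pvChAt cs2 (j-1), '-')])
      else if 0 < k ∧ (pvCallF cs1 cs2 cs3 i j k m).1 =
          (pvCallF cs1 cs2 cs3 i j (k-1) (pvCallF cs1 cs2 cs3 i (j-1) k (pvCallF cs1 cs2 cs3 (i-1) j k (pvCallF cs1 cs2 cs3 i j k m).2).2).2).1 then
        pvTbB cs1 cs2 cs3 fuel i j (k-1)
          (pvCallF cs1 cs2 cs3 i j (k-1) (pvCallF cs1 cs2 cs3 i (j-1) k (pvCallF cs1 cs2 cs3 (i-1) j k (pvCallF cs1 cs2 cs3 i j k m).2).2).2).2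
          (p ++ [('-', '-', pvChAt cs3 (k-1))])
      else
        pvTbB cs1 cs2 cs3 fuel i j k
          (pvCallF cs1 cs2 cs3 i j (k-1) (pvCallF cs1 cs2 cs3 i (j-1) k (pvCallF cs1 cs2 cs3 (i-1) j k (pvCallF cs1 cs2 cs3 i j k m).2).2).2).2 p
    else p

def multiple_alignment_alt (s1 : String) (s2 : String) (s3 : String) : Int × String × String × String :=
  let cs1 := s1.toList
  let cs2 := s2.toList
  let cs3 := s3.toList
  let r := pvCallF cs1 cs2 cs3 cs1.length cs2.length cs3.length PySem.Dict.empty   -- score = f(l1,l2,l3), memo populated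
  let parts := (pvTbB cs1 cs2 cs3 (cs1.length + cs2.length + cs3.length) cs1.length cs2.length cs3.length r.2 []).reverse
  (r.1, String.ofList (parts.map (·.1)), String.ofList (parts.map (·.2.1)), String.ofList (parts.map (·.2.2)))

-- ===== PRECONDITION & SPEC =====
def Spec_multiple_alignment (s1 : String) (s2 : String) (s3 : String) (out : Int × String × String × String) : Prop := out = multiple_alignment_alt s1 s2 s3
instance (s1 : String) (s2 : String) (s3 : String) (out : Int × String × String × String) : Decidable (Spec_multiple_alignment s1 s2 s3 out) := by unfold Spec_multiple_alignment; infer_instance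

-- ===== CLAIM (what is proved, stated in full; the proofs are below) =====
def Claim_equal_multiple_alignment : Prop := ∀ (s1 : String) (s2 : String) (s3 : String), Dom_multiple_alignment s1 s2 s3 → Spec_multiple_alignment s1 s2 s3 (multiple_alignment s1 s2 s3)

-- ===== LEMMAS AND PROOFS =====

-- the mathematical LCS3 recurrence (proof-only specification of both programs' DP)
def pvL (cs1 cs2 cs3 : List Char) (i j k : Nat) : Int :=
  if i = 0 ∨ j = 0 ∨ k = 0 then 0
  else if pvChAt cs1 (i-1) = pvChAt cs2 (j-1) ∧ pvChAt cs2 (j-1) = pvChAt cs3 (k-1) then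
    pvL cs1 cs2 cs3 (i-1) (j-1) (k-1) + 1
  else
    max (max (pvL cs1 cs2 cs3 (i-1) j k) (pvL cs1 cs2 cs3 i (j-1) k)) (pvL cs1 cs2 cs3 i j (k-1))
termination_by i + j + k
decreasing_by all_goals omega

lemma pvL_zero (cs1 cs2 cs3 : List Char) (i j k : Nat) (h : i = 0 ∨ j = 0 ∨ k = 0) :
    pvL cs1 cs2 cs3 i j k = 0 := by
  rw [pvL]; simp [h]

lemma pvGetD_set (l : List Int) (i j : Nat) (a d : Int) :
    (l.set i a).getD j d = if i = j ∧ j < l.length then a else l.getD j d := by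
  simp only [List.getD_eq_getElem?_getD, List.getElem?_set]
  split_ifs <;> simp_all

lemma pvGetDL_set (l : List (List Int)) (i j : Nat) (a : List Int) :
    (l.set i a).getD j [] = if i = j ∧ j < l.length then a else l.getD j [] := by
  simp only [List.getD_eq_getElem?_getD, List.getElem?_set]
  split_ifs <;> simp_all

lemma pvGetDLL_set (l : List (List (List Int))) (i j : Nat) (a : List (List Int)) :
    (l.set i a).getD j [] = if i = j ∧ j < l.length then a else l.getD j [] := by
  simp only [List.getD_eq_getElem?_getD, List.getElem?_set]
  split_ifs <;> simp_all

-- shape of the cube: lengths of every level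
def pvShape (l1 l2 l3 : Nat) (t : List (List (List Int))) : Prop :=
  t.length = l1 + 1 ∧
  (∀ a, (t.getD a []).length = if a ≤ l1 then l2 + 1 else 0) ∧
  (∀ a b, ((t.getD a []).getD b []).length = if a ≤ l1 ∧ b ≤ l2 then l3 + 1 else 0)

lemma pvShape_set3 (l1 l2 l3 : Nat) (t : List (List (List Int))) (i j k : Nat) (v : Int)
    (hs : pvShape l1 l2 l3 t) (hi : i ≤ l1) (hj : j ≤ l2) :
    pvShape l1 l2 l3 (pvSet3 t i j k v) := by
  obtain ⟨h1, h2, h3⟩ := hs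
  refine ⟨by simp [pvSet3, h1], ?_, ?_⟩
  · intro a
    rw [pvSet3, pvGetDLL_set]
    by_cases h : i = a ∧ a < t.length
    · rw [if_pos h, List.length_set, h2 i]
      simp [← h.1, hi]
    · rw [if_neg h]; exact h2 a
  · intro a b
    rw [pvSet3, pvGetDLL_set]
    by_cases h : i = a ∧ a < t.length
    · rw [if_pos h, pvGetDL_set]
      by_cases h' : j = b ∧ b < (t.getD i []).length
      · rw [if_pos h', List.length_set, h3 i j]
        simp [← h.1, ← h'.1, hi, hj]
      · rw [if_neg h', h3 i b, ← h.1]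
    · rw [if_neg h]; exact h3 a b

lemma pvGet3_set3_self (l1 l2 l3 : Nat) (t : List (List (List Int))) (i j k : Nat) (v : Int)
    (hs : pvShape l1 l2 l3 t) (hi : i ≤ l1) (hj : j ≤ l2) (hk : k ≤ l3) :
    pvGet3 (pvSet3 t i j k v) i j k = v := by
  obtain ⟨h1, h2, h3⟩ := hs
  have hti : i < t.length := by omega
  have htj : j < (t.getD i []).length := by rw [h2 i, if_pos hi]; omega
  have htk : k < ((t.getD i []).getD j []).length := by rw [h3 i j, if_pos ⟨hi, hj⟩]; omega
  rw [pvGet3, pvSet3, pvGetDLL_set, if_pos ⟨rfl, hti⟩, pvGetDL_set, if_pos ⟨rfl, htj⟩,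
    pvGetD_set, if_pos ⟨rfl, htk⟩]

lemma pvGet3_set3_ne (t : List (List (List Int))) (i j k a b c : Nat) (v : Int)
    (h : ¬ (a = i ∧ b = j ∧ c = k)) :
    pvGet3 (pvSet3 t i j k v) a b c = pvGet3 t a b c := by
  rw [pvGet3, pvGet3, pvSet3, pvGetDLL_set]
  by_cases h1 : i = a ∧ a < t.length
  · rw [if_pos h1, ← h1.1, pvGetDL_set]
    by_cases h2 : j = b ∧ b < (t.getD i []).length
    · rw [if_pos h2, ← h2.1, pvGetD_set]
      by_cases h3 : k = c ∧ c < ((t.getD i []).getD j []).length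
      · exact absurd ⟨h1.1.symm, h2.1.symm, h3.1.symm⟩ h
      · rw [if_neg h3]
    · rw [if_neg h2]
  · rw [if_neg h1]

-- cells lexicographically before the frontier (i,j,k) in A's fill order, plus the
-- all-zero boundary planes
def pvDone (l2 l3 i j k a b c : Nat) : Prop :=
  a = 0 ∨ b = 0 ∨ c = 0 ∨
    (b ≤ l2 ∧ c ≤ l3 ∧ (a < i ∨ (a = i ∧ (b < j ∨ (b = j ∧ c ≤ k)))))

def pvInv (cs1 cs2 cs3 : List Char) (t : List (List (List Int))) (i j k : Nat) : Prop :=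
  pvShape cs1.length cs2.length cs3.length t ∧
  ∀ a b c, pvDone cs2.length cs3.length i j k a b c → pvGet3 t a b c = pvL cs1 cs2 cs3 a b c

lemma pvInv_mono (cs1 cs2 cs3 : List Char) (t : List (List (List Int))) {i j k i' j' k' : Nat}
    (h : ∀ a b c, pvDone cs2.length cs3.length i' j' k' a b c → pvDone cs2.length cs3.length i j k a b c)
    (ht : pvInv cs1 cs2 cs3 t i j k) : pvInv cs1 cs2 cs3 t i' j' k' :=
  ⟨ht.1, fun a b c hd => ht.2 a b c (h a b c hd)⟩

lemma pvL_cell (cs1 cs2 cs3 : List Char) (t : List (List (List Int))) (i j k : Nat)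
    (hi : 0 < i) (hj : 0 < j) (hk : 0 < k)
    (h1 : pvGet3 t (i-1) (j-1) (k-1) = pvL cs1 cs2 cs3 (i-1) (j-1) (k-1))
    (h2 : pvGet3 t (i-1) j k = pvL cs1 cs2 cs3 (i-1) j k)
    (h3 : pvGet3 t i (j-1) k = pvL cs1 cs2 cs3 i (j-1) k)
    (h4 : pvGet3 t i j (k-1) = pvL cs1 cs2 cs3 i j (k-1)) :
    pvCellA cs1 cs2 cs3 t i j k = pvL cs1 cs2 cs3 i j k := by
  have h : ¬ (i = 0 ∨ j = 0 ∨ k = 0) := by omega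
  rw [pvCellA, pvL]
  simp only [h, if_false]
  rw [h1, h2, h3, h4]

lemma pvFoldK (cs1 cs2 cs3 : List Char) (i j : Nat) (hi : 0 < i) (hi2 : i ≤ cs1.length)
    (hj : 0 < j) (hj2 : j ≤ cs2.length) :
    ∀ m, m ≤ cs3.length → ∀ t, pvInv cs1 cs2 cs3 t i j 0 →
      pvInv cs1 cs2 cs3
        (((List.range m).map (· + 1)).foldl (fun t k => pvSet3 t i j k (pvCellA cs1 cs2 cs3 t i j k)) t) i j m := by
  intro m
  induction m with
  | zero => intro _ t ht; simpa using ht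
  | succ n ih =>
    intro hm t ht
    rw [List.range_succ, List.map_append, List.foldl_append]
    set tm := ((List.range n).map (· + 1)).foldl (fun t k => pvSet3 t i j k (pvCellA cs1 cs2 cs3 t i j k)) t with htm
    have hIH : pvInv cs1 cs2 cs3 tm i j n := ih (by omega) t ht
    obtain ⟨hS, hA⟩ := hIH
    simp only [List.map_cons, List.map_nil, List.foldl_cons, List.foldl_nil]
    refine ⟨pvShape_set3 _ _ _ tm i j (n+1) _ hS hi2 hj2, ?_⟩
    intro a b c hd
    by_cases hc : a = i ∧ b = j ∧ c = n + 1
    · obtain ⟨ha, hb, hcc⟩ := hc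
      rw [ha, hb, hcc,
        pvGet3_set3_self cs1.length cs2.length cs3.length tm i j (n+1) _ hS hi2 hj2 (by omega)]
      exact pvL_cell cs1 cs2 cs3 tm i j (n+1) hi hj (by omega)
        (hA _ _ _ (by unfold pvDone; omega))
        (hA _ _ _ (by unfold pvDone; omega))
        (hA _ _ _ (by unfold pvDone; omega))
        (hA _ _ _ (by unfold pvDone; omega))
    · rw [pvGet3_set3_ne tm i j (n+1) a b c _ hc]
      exact hA a b c (by unfold pvDone at hd ⊢; omega)

lemma pvFoldJ (cs1 cs2 cs3 : List Char) (i : Nat) (hi : 0 < i) (hi2 : i ≤ cs1.length) :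
    ∀ m, m ≤ cs2.length → ∀ t, pvInv cs1 cs2 cs3 t i 1 0 →
      pvInv cs1 cs2 cs3
        (((List.range m).map (· + 1)).foldl (fun t j =>
          ((List.range cs3.length).map (· + 1)).foldl (fun t k =>
            pvSet3 t i j k (pvCellA cs1 cs2 cs3 t i j k)) t) t) i (m+1) 0 := by
  intro m
  induction m with
  | zero => intro _ t ht; simpa using ht
  | succ n ih =>
    intro hm t ht
    rw [List.range_succ, List.map_append, List.foldl_append]
    have hIH := ih (by omega) t ht
    simp only [List.map_cons, List.map_nil, List.foldl_cons, List.foldl_nil]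
    have hK := pvFoldK cs1 cs2 cs3 i (n+1) hi hi2 (by omega) (by omega) cs3.length le_rfl _ hIH
    exact pvInv_mono cs1 cs2 cs3 _ (fun a b c => by unfold pvDone; omega) hK

lemma pvFoldI (cs1 cs2 cs3 : List Char) :
    ∀ m, m ≤ cs1.length →
      pvInv cs1 cs2 cs3
        (((List.range m).map (· + 1)).foldl (fun t i =>
          ((List.range cs2.length).map (· + 1)).foldl (fun t j =>
            ((List.range cs3.length).map (· + 1)).foldl (fun t k =>
              pvSet3 t i j k (pvCellA cs1 cs2 cs3 t i j k)) t) t)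
          (List.replicate (cs1.length + 1) (List.replicate (cs2.length + 1) (List.replicate (cs3.length + 1) (0 : Int)))))
        (m+1) 1 0 := by
  intro m
  induction m with
  | zero =>
    intro _
    simp only [List.range_zero, List.map_nil, List.foldl_nil]
    constructor
    · refine ⟨by simp, fun a => ?_, fun a b => ?_⟩
      · by_cases h : a ≤ cs1.length <;>
          simp [List.getD_eq_getElem?_getD, List.getElem?_replicate, h, Nat.lt_succ_iff]
      · by_cases h : a ≤ cs1.length ∧ b ≤ cs2.length
        · simp [List.getD_eq_getElem?_getD, List.getElem?_replicate, h.1, h.2, Nat.lt_succ_iff]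
        · rw [if_neg h]
          rcases not_and_or.mp h with h' | h'
          · simp [List.getD_eq_getElem?_getD, List.getElem?_replicate, Nat.lt_succ_iff, h']
          · by_cases ha : a ≤ cs1.length <;>
              simp [List.getD_eq_getElem?_getD, List.getElem?_replicate, Nat.lt_succ_iff, ha, h']
    · intro a b c hd
      have hz : a = 0 ∨ b = 0 ∨ c = 0 := by unfold pvDone at hd; omega
      rw [pvL_zero cs1 cs2 cs3 a b c hz, pvGet3]
      simp only [List.getD_eq_getElem?_getD, List.getElem?_replicate]
      split_ifs <;> simp [List.getElem?_replicate] <;> split_ifs <;> simp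
  | succ n ih =>
    intro hm
    rw [List.range_succ, List.map_append, List.foldl_append]
    have hIH := ih (by omega)
    simp only [List.map_cons, List.map_nil, List.foldl_cons, List.foldl_nil]
    have hJ := pvFoldJ cs1 cs2 cs3 (n+1) (by omega) (by omega) cs2.length le_rfl _ hIH
    exact pvInv_mono cs1 cs2 cs3 _ (fun a b c => by unfold pvDone; omega) hJ

lemma pvFill_correct (cs1 cs2 cs3 : List Char) (a b c : Nat)
    (ha : a ≤ cs1.length) (hb : b ≤ cs2.length) (hc : c ≤ cs3.length) :
    pvGet3 (pvFillA cs1 cs2 cs3) a b c = pvL cs1 cs2 cs3 a b c := by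
  have h := pvFoldI cs1 cs2 cs3 cs1.length le_rfl
  exact h.2 a b c (by unfold pvDone; omega)

-- every value cached in B's memo is the corresponding pvL value
def pvMemoOK (cs1 cs2 cs3 : List Char) (m : PySem.Dict (Nat × Nat × Nat) Int) : Prop :=
  ∀ q v, m.get? q = some v → v = pvL cs1 cs2 cs3 q.1 q.2.1 q.2.2

lemma pvMemoOK_insert (cs1 cs2 cs3 : List Char) (m : PySem.Dict (Nat × Nat × Nat) Int)
    (i j k : Nat) (v : Int) (hm : pvMemoOK cs1 cs2 cs3 m) (hv : v = pvL cs1 cs2 cs3 i j k) :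
    pvMemoOK cs1 cs2 cs3 (m.insert (i, j, k) v) := by
  intro q w hq
  rw [PySem.Dict.get?_insert] at hq
  split_ifs at hq with h
  · cases hq; rw [h]; exact hv
  · exact hm q w hq

lemma pvF_correct (cs1 cs2 cs3 : List Char) :
    ∀ fuel i j k m, i + j + k ≤ fuel → pvMemoOK cs1 cs2 cs3 m →
      (pvF cs1 cs2 cs3 fuel i j k m).1 = pvL cs1 cs2 cs3 i j k ∧
      pvMemoOK cs1 cs2 cs3 (pvF cs1 cs2 cs3 fuel i j k m).2 := by
  intro fuel
  induction fuel with
  | zero =>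
    intro i j k m hf hm
    have h0 : i = 0 ∨ j = 0 ∨ k = 0 := by omega
    rw [pvF]
    exact ⟨(pvL_zero cs1 cs2 cs3 i j k h0).symm, hm⟩
  | succ n ih =>
    intro i j k m hf hm
    rw [pvF]
    by_cases h0 : i = 0 ∨ j = 0 ∨ k = 0
    · simp only [h0, if_true]
      exact ⟨(pvL_zero cs1 cs2 cs3 i j k h0).symm, hm⟩
    · simp only [h0, if_false]
      cases hq : m.get? (i, j, k) with
      | some v => exact ⟨hm (i, j, k) v hq, hm⟩
      | none =>
        simp only
        by_cases hch : pvChAt cs1 (i-1) = pvChAt cs2 (j-1) ∧ pvChAt cs2 (j-1) = pvChAt cs3 (k-1)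
        · simp only [hch, and_self, if_true]
          have hr := ih (i-1) (j-1) (k-1) m (by omega) hm
          have hL : pvL cs1 cs2 cs3 i j k = pvL cs1 cs2 cs3 (i-1) (j-1) (k-1) + 1 := by
            conv_lhs => rw [pvL]
            simp [h0, hch]
          have hv : (pvF cs1 cs2 cs3 n (i-1) (j-1) (k-1) m).1 + 1 = pvL cs1 cs2 cs3 i j k := by
            rw [hr.1, hL]
          exact ⟨hv, pvMemoOK_insert cs1 cs2 cs3 _ i j k _ hr.2 hv⟩
        · simp only [hch, if_false]
          have hr1 := ih (i-1) j k m (by omega) hm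
          have hr2 := ih i (j-1) k (pvF cs1 cs2 cs3 n (i-1) j k m).2 (by omega) hr1.2
          have hr3 := ih i j (k-1) (pvF cs1 cs2 cs3 n i (j-1) k _).2 (by omega) hr2.2
          have hL : pvL cs1 cs2 cs3 i j k =
              max (max (pvL cs1 cs2 cs3 (i-1) j k) (pvL cs1 cs2 cs3 i (j-1) k)) (pvL cs1 cs2 cs3 i j (k-1)) := by
            conv_lhs => rw [pvL]
            simp [h0, hch]
          have hv : max (max (pvF cs1 cs2 cs3 n (i-1) j k m).1
              (pvF cs1 cs2 cs3 n i (j-1) k (pvF cs1 cs2 cs3 n (i-1) j k m).2).1)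
              (pvF cs1 cs2 cs3 n i j (k-1) (pvF cs1 cs2 cs3 n i (j-1) k (pvF cs1 cs2 cs3 n (i-1) j k m).2).2).1
              = pvL cs1 cs2 cs3 i j k := by
            rw [hr1.1, hr2.1, hr3.1, hL]
          exact ⟨hv, pvMemoOK_insert cs1 cs2 cs3 _ i j k _ hr3.2 hv⟩

lemma pvCallF_correct (cs1 cs2 cs3 : List Char) (i j k : Nat) (m : PySem.Dict (Nat × Nat × Nat) Int)
    (hm : pvMemoOK cs1 cs2 cs3 m) :
    (pvCallF cs1 cs2 cs3 i j k m).1 = pvL cs1 cs2 cs3 i j k ∧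
    pvMemoOK cs1 cs2 cs3 (pvCallF cs1 cs2 cs3 i j k m).2 :=
  pvF_correct cs1 cs2 cs3 (i + j + k) i j k m le_rfl hm

lemma pvTbB_append (cs1 cs2 cs3 : List Char) :
    ∀ fuel i j k m p, pvTbB cs1 cs2 cs3 fuel i j k m p = p ++ pvTbB cs1 cs2 cs3 fuel i j k m [] := by
  intro fuel
  induction fuel with
  | zero => intro i j k m p; simp [pvTbB]
  | succ n ih =>
    intro i j k m p
    rw [pvTbB, pvTbB]
    split_ifs with h0 h1 h2 h3 h4
    · rw [ih _ _ _ _ (p ++ _), ih _ _ _ _ ([] ++ _)]; simp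
    · rw [ih _ _ _ _ (p ++ _), ih _ _ _ _ ([] ++ _)]; simp
    · rw [ih _ _ _ _ (p ++ _), ih _ _ _ _ ([] ++ _)]; simp
    · rw [ih _ _ _ _ (p ++ _), ih _ _ _ _ ([] ++ _)]; simp
    · exact ih _ _ _ _ p
    · simp

lemma pvTb_rel (cs1 cs2 cs3 : List Char) (G : List (List (List Int)))
    (hG : ∀ a b c, a ≤ cs1.length → b ≤ cs2.length → c ≤ cs3.length →
      pvGet3 G a b c = pvL cs1 cs2 cs3 a b c) :
    ∀ fuel i j k, i ≤ cs1.length → j ≤ cs2.length → k ≤ cs3.length →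
      ∀ m, pvMemoOK cs1 cs2 cs3 m → ∀ a1 a2 a3,
      pvTbA G cs1 cs2 cs3 fuel i j k a1 a2 a3 =
        (((pvTbB cs1 cs2 cs3 fuel i j k m []).reverse.map (·.1)) ++ a1,
         ((pvTbB cs1 cs2 cs3 fuel i j k m []).reverse.map (·.2.1)) ++ a2,
         ((pvTbB cs1 cs2 cs3 fuel i j k m []).reverse.map (·.2.2)) ++ a3) := by
  intro fuel
  induction fuel with
  | zero => intro i j k _ _ _ m _ a1 a2 a3; simp [pvTbA, pvTbB]
  | succ n ih =>
    intro i j k hi hj hk m hm a1 a2 a3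
    have e0 : pvGet3 G i j k = pvL cs1 cs2 cs3 i j k := hG _ _ _ hi hj hk
    have e1 : pvGet3 G (i-1) j k = pvL cs1 cs2 cs3 (i-1) j k := hG _ _ _ (by omega) hj hk
    have e2 : pvGet3 G i (j-1) k = pvL cs1 cs2 cs3 i (j-1) k := hG _ _ _ hi (by omega) hk
    have e3 : pvGet3 G i j (k-1) = pvL cs1 cs2 cs3 i j (k-1) := hG _ _ _ hi hj (by omega)
    have hc0 := pvCallF_correct cs1 cs2 cs3 i j k m hm
    have hc1 := pvCallF_correct cs1 cs2 cs3 (i-1) j k _ hc0.2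
    have hc2 := pvCallF_correct cs1 cs2 cs3 i (j-1) k _ hc1.2
    have hc3 := pvCallF_correct cs1 cs2 cs3 i j (k-1) _ hc2.2
    rw [pvTbA]
    simp only [pvTbB, e0, e1, e2, e3, hc0.1, hc1.1, hc2.1, hc3.1]
    split_ifs with h0 h1 h2 h3 h4
    · rw [ih (i-1) (j-1) (k-1) (by omega) (by omega) (by omega) m hm,
        pvTbB_append cs1 cs2 cs3 n (i-1) (j-1) (k-1) _ ([] ++ _)]
      simp
    · rw [ih (i-1) j k (by omega) hj hk _ hc1.2,
        pvTbB_append cs1 cs2 cs3 n (i-1) j k _ ([] ++ _)]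
      simp
    · rw [ih i (j-1) k hi (by omega) hk _ hc2.2,
        pvTbB_append cs1 cs2 cs3 n i (j-1) k _ ([] ++ _)]
      simp
    · rw [ih i j (k-1) hi hj (by omega) _ hc3.2,
        pvTbB_append cs1 cs2 cs3 n i j (k-1) _ ([] ++ _)]
      simp
    · exact ih i j k hi hj hk _ hc3.2 a1 a2 a3
    · simp

-- ===== VERDICT (by name: the statement is the Claim_ definition above) =====
theorem multiple_alignment_spec : Claim_equal_multiple_alignment := by
  intro s1 s2 s3 _
  unfold Spec_multiple_alignment multiple_alignment multiple_alignment_alt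
  simp only
  have hempty : pvMemoOK s1.toList s2.toList s3.toList PySem.Dict.empty := by
    intro q v hq
    rw [PySem.Dict.get?_empty] at hq
    cases hq
  have hG := pvFill_correct s1.toList s2.toList s3.toList
  have hc := pvCallF_correct s1.toList s2.toList s3.toList
    s1.toList.length s2.toList.length s3.toList.length PySem.Dict.empty hempty
  have h := pvTb_rel s1.toList s2.toList s3.toList (pvFillA s1.toList s2.toList s3.toList)
    (fun a b c ha hb hc => hG a b c ha hb hc)
    (s1.toList.length + s2.toList.length + s3.toList.length)
    s1.toList.length s2.toList.length s3.toList.length le_rfl le_rfl le_rfl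
    _ hc.2 [] [] []
  rw [h, hG _ _ _ le_rfl le_rfl le_rfl, hc.1]
  simp
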